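-- pv_equiv track=rewrite | github.com/lmrae0624/Algorithm | 프로그래머스/***최고의 집합.py | solution
-- ===== SOURCE A (Python) =====
-- def solution(n, s):
--     if n>s:
--         return [-1]
--
--     answer = []
--     a=s//n
--     b=s%n
--     for i in range(n):
--         if b>0:
--             answer.append(a+1)
--             b-=1
--         else:
--             answer.append(a)
--     answer.sort()
--
--     return answer
-- ===== SOURCE B (Python) =====
-- def solution(n, s):
--     if n > s:
--         return [-1]
--     return [(s + i) // n for i in range(n)]
-- ===== Notes on version B (the rewrite author's own statement) =====
-- stated objective: alternative
-- what changed: B computes element i directly by the index formula (s+i)//n over range(n), with no quotient/remainder distribution, no branching append loop and no sort.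
import Mathlib
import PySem

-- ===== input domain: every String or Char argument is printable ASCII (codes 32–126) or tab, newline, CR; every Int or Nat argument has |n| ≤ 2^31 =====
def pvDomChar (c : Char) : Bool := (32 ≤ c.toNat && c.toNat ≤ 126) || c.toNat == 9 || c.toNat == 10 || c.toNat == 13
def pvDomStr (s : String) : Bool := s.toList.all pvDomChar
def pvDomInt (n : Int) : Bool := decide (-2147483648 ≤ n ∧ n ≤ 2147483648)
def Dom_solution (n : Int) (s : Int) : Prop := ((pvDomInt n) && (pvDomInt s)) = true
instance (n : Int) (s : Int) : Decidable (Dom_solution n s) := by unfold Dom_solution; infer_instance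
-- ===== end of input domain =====

-- B replaces A's divmod-distribution loop + sort by the per-index formula (s+i)//n over range(n); no sort, no remainder bookkeeping.

-- ===== PORT A =====
-- the 'for i in range(n)' loop: i is unused, so it is structural recursion on the remaining count
def loopA (a : Int) : Nat → Int → List Int → List Int
  | 0, _, acc => acc
  | k+1, b, acc => if b > 0 then loopA a k (b-1) (acc ++ [a+1]) else loopA a k b (acc ++ [a])

def solution (n : Int) (s : Int) : List Int :=
  if n > s then [-1]
  else
    let a := PySem.Int.floordiv s n
    let b := PySem.Int.mod s n
    PySem.List.sorted (loopA a n.toNat b []) (fun x => x) false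

-- ===== PORT B =====
def solution_alt (n : Int) (s : Int) : List Int :=
  if n > s then [-1]
  else (PySem.List.pyRange 0 n 1).map (fun i => PySem.Int.floordiv (s + i) n)

-- ===== PRECONDITION & SPEC =====
-- Pre_ excludes only n = 0 with s ≥ 0, where A raises ZeroDivisionError on s // n.
def Pre_solution (n : Int) (s : Int) : Prop := n > s ∨ n ≠ 0
instance (n : Int) (s : Int) : Decidable (Pre_solution n s) := by unfold Pre_solution; infer_instance
def pvWitness_solution : Int × Int := (3, 7)

def Spec_solution (n : Int) (s : Int) (out : List Int) : Prop := out = solution_alt n s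
instance (n : Int) (s : Int) (out : List Int) : Decidable (Spec_solution n s out) := by unfold Spec_solution; infer_instance

-- ===== CLAIM (what is proved, stated in full; the proofs are below) =====
def Claim_equal_solution : Prop := ∀ (n : Int) (s : Int), Dom_solution n s → Pre_solution n s → Spec_solution n s (solution n s)

-- ===== LEMMAS AND PROOFS =====

-- the loop appends min(b,k) copies of a+1 followed by the remaining copies of a
theorem loopA_eq (a : Int) : ∀ (k : Nat) (b : Int) (acc : List Int),
    loopA a k b acc = acc ++ List.replicate (min b.toNat k) (a+1) ++ List.replicate (k - b.toNat) a := by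
  intro k
  induction k with
  | zero => intro b acc; simp [loopA]
  | succ k ih =>
    intro b acc
    by_cases hb : b > 0
    · have h2 : min b.toNat (k+1) = min (b-1).toNat k + 1 := by omega
      have h3 : k + 1 - b.toNat = k - (b-1).toNat := by omega
      simp only [loopA, if_pos hb, ih, h2, h3, List.replicate_succ, List.append_assoc,
        List.cons_append, List.nil_append]
    · have h0 : b.toNat = 0 := by omega
      simp only [loopA, if_neg hb, ih, h0, Nat.zero_min, List.replicate_zero,
        List.nil_append, List.replicate_succ, List.append_assoc, List.cons_append,
        Nat.sub_zero]

-- A's value for n > 0, n ≤ s, written as the sorted two-block list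
theorem solution_eq_blocks (n s : Int) (hn : 0 < n) (hns : ¬ n > s) :
    solution n s = List.replicate (n.toNat - (PySem.Int.mod s n).toNat) (PySem.Int.floordiv s n)
      ++ List.replicate (PySem.Int.mod s n).toNat (PySem.Int.floordiv s n + 1) := by
  have hb0 : 0 ≤ PySem.Int.mod s n := PySem.Int.mod_nonneg (a := s) hn
  have hbn : PySem.Int.mod s n < n := PySem.Int.mod_lt (a := s) hn
  simp only [solution, if_neg hns]
  rw [loopA_eq]
  have hmin : min (PySem.Int.mod s n).toNat n.toNat = (PySem.Int.mod s n).toNat := by omega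
  rw [hmin, List.nil_append]
  apply PySem.List.sorted_id_eq_of_perm_of_pairwise
  · exact List.perm_append_comm
  · rw [List.pairwise_append]
    refine ⟨List.pairwise_replicate.mpr (Or.inr le_rfl),
            List.pairwise_replicate.mpr (Or.inr le_rfl), ?_⟩
    intro x hx y hy
    rw [List.eq_of_mem_replicate hx, List.eq_of_mem_replicate hy]
    omega

-- B's per-index value: (s+k)//n is a on the first n-b indices and a+1 on the last b
theorem floordiv_add_index (n s : Int) (hn : 0 < n) (k : Nat) (hk : k < n.toNat) :
    PySem.Int.floordiv (s + (k : Int)) n =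
      if k < n.toNat - (PySem.Int.mod s n).toNat then PySem.Int.floordiv s n
      else PySem.Int.floordiv s n + 1 := by
  have hb0 : 0 ≤ PySem.Int.mod s n := PySem.Int.mod_nonneg (a := s) hn
  have hbn : PySem.Int.mod s n < n := PySem.Int.mod_lt (a := s) hn
  have hsum := PySem.Int.floordiv_mul_add_mod s n
  have h1 : (PySem.Int.floordiv s n + 1) * n = PySem.Int.floordiv s n * n + n := by ring
  have h2 : (PySem.Int.floordiv s n + 1 + 1) * n = PySem.Int.floordiv s n * n + n + n := by ring
  split_ifs with h
  · have hkb : (k : Int) < n - PySem.Int.mod s n := by omega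
    rw [PySem.Int.floordiv_eq_iff_of_pos (hb := hn)]
    exact ⟨by linarith, by rw [h1]; linarith⟩
  · have hkb : n - PySem.Int.mod s n ≤ (k : Int) := by omega
    have hki : (k : Int) < n := by omega
    rw [PySem.Int.floordiv_eq_iff_of_pos (hb := hn)]
    exact ⟨by rw [h1]; linarith, by rw [h2]; linarith⟩

theorem solution_spec : Claim_equal_solution := by
  intro n s _ hpre
  unfold Spec_solution solution_alt
  by_cases hns : n > s
  · simp [solution, hns]
  · rw [if_neg hns]
    rcases lt_trichotomy n 0 with hn | hn | hn
    · -- n < 0: loop runs zero times, range is empty; both sides are []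
      have hbb := PySem.Int.mod_neg_bounds (a := s) (b := n) hn
      have h1 : n.toNat = 0 := by omega
      simp [solution, hns, h1, loopA, PySem.List.sorted, PySem.List.pyRange_one_eq_nil hn.le]
    · exact absurd hn (by rcases hpre with h | h <;> omega)
    · rw [solution_eq_blocks n s hn hns, PySem.List.pyRange_one]
      have hb0 : 0 ≤ PySem.Int.mod s n := PySem.Int.mod_nonneg (a := s) hn
      have hbn : PySem.Int.mod s n < n := PySem.Int.mod_lt (a := s) hn
      apply List.ext_getElem
      · simp; omega
      · intro k hk1 hk2
        have hkn : k < n.toNat := by simp at hk2; omega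
        simp only [List.getElem_map, List.getElem_range, zero_add,
          floordiv_add_index n s hn k hkn]
        by_cases h : k < n.toNat - (PySem.Int.mod s n).toNat
        · rw [if_pos h, List.getElem_append_left (by simpa using h), List.getElem_replicate]
        · rw [if_neg h, List.getElem_append_right (by simpa using h), List.getElem_replicate]
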